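-- pv_equiv track=rewrite | github.com/IATI/IATI-Standard-SSOT | gen.py | lookup_see_also
-- ===== SOURCE A (Python) =====
-- def lookup_see_also(standard, mapping, path):
--     """Return a generator object containing paths relating to the current element as defined by overview-mapping.json.
--
--     Args:
--         standard (str): Can be either organisation-standard or activity-standard)
--         mapping (list): List for all templates elements within [standard]/overview-mapping.json
--         path (str): Last sections of the path passed to see_also, if shorter than 3 sections it will just be the entire path
--
--     Returns:
--         generator or str: Yields paths of elements related to the current element
--     """
--     if path == '':
--         return
--     for overview, elements in mapping.items():
--         if path in elements:
--             yield '/' + standard + '/overview/' + overview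
--     for x in lookup_see_also(standard, mapping, '/'.join(path.split('/')[:-1])):
--         yield x
-- ===== SOURCE B (Python) =====
-- def lookup_see_also(standard, mapping, path):
--     """Staged re-implementation: precompute all truncated suffixes of path as
--     prefixes of its '/'-split, then produce matches in one comprehension."""
--     parts = path.split('/')
--     suffixes = ['/'.join(parts[:i]) for i in range(len(parts), 0, -1)]
--     return ['/' + standard + '/overview/' + overview
--             for p in suffixes if p != ''
--             for overview, elements in mapping.items() if p in elements]
-- ===== Notes on version B (the rewrite author's own statement) =====
-- stated objective: alternative
-- what changed: Replaces the generator recursion (each level re-splitting and re-joining the path and recursing) with a staged computation: split the path once, precompute the list of all truncated suffixes as joins of split-prefixes, then emit all matches in a single comprehension over that list.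
import Mathlib
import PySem

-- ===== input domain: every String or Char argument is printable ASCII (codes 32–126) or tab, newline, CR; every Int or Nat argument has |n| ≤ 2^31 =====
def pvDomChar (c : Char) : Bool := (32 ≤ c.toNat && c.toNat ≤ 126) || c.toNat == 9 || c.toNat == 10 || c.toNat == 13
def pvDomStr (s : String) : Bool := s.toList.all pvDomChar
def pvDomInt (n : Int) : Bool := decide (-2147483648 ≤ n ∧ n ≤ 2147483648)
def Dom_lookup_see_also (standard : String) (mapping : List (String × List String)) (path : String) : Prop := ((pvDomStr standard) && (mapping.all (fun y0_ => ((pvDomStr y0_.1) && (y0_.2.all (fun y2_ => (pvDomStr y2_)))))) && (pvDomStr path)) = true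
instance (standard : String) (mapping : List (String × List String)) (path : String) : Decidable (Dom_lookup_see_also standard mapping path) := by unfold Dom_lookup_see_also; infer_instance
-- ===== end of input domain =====

-- B changes the decomposition: instead of A's generator recursion that re-splits and
-- re-joins the path at every level, B splits the path once, precomputes all truncated
-- suffixes as joins of prefixes of the split, and emits matches in one comprehension.

-- ===== PORT A =====
-- '/'.join(path.split('/')[:-1]) — A recomputes this at every level
def pvTruncPath (path : String) : String :=
  PySem.Str.join "/" (PySem.List.slice ((PySem.Str.split? path "/").getD []) none (some (-1)))

-- A's recursion, fuel-bounded (truncation strictly shortens a non-empty path, so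
-- fuel = path.length + 1 always suffices; fuel is only a totality guard)
def lookup_see_also_go (standard : String) (mapping : List (String × List String)) : Nat → String → List String
  | 0, _ => []
  | fuel + 1, path =>
    if path = "" then []
    else
      (mapping.foldl (fun acc p =>
        if p.2.contains path then acc ++ ["/" ++ standard ++ "/overview/" ++ p.1] else acc) [])
      ++ lookup_see_also_go standard mapping fuel (pvTruncPath path)

def lookup_see_also (standard : String) (mapping : List (String × List String)) (path : String) : List String :=
  lookup_see_also_go standard mapping (path.length + 1) path

-- ===== PORT B =====
def lookup_see_also_alt (standard : String) (mapping : List (String × List String)) (path : String) : List String :=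
  let parts := (PySem.Str.split? path "/").getD []
  let suffixes := (PySem.List.pyRange (parts.length : Int) 0 (-1)).map
    (fun i => PySem.Str.join "/" (PySem.List.slice parts none (some i)))
  suffixes.flatMap (fun p =>
    if p ≠ "" then
      (mapping.filter (fun q => q.2.contains p)).map
        (fun q => "/" ++ standard ++ "/overview/" ++ q.1)
    else [])

-- ===== PRECONDITION & SPEC =====
def Spec_lookup_see_also (standard : String) (mapping : List (String × List String)) (path : String) (out : List String) : Prop := out = lookup_see_also_alt standard mapping path
instance (standard : String) (mapping : List (String × List String)) (path : String) (out : List String) : Decidable (Spec_lookup_see_also standard mapping path out) := by unfold Spec_lookup_see_also; infer_instance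

-- ===== CLAIM (what is proved, stated in full; the proofs are below) =====
def Claim_equal_lookup_see_also : Prop := ∀ (standard : String) (mapping : List (String × List String)) (path : String), Dom_lookup_see_also standard mapping path → Spec_lookup_see_also standard mapping path (lookup_see_also standard mapping path)

-- ===== LEMMAS AND PROOFS =====

theorem splitOn_go_eq (fuel : Nat) : ∀ (l cur : List Char) (acc : List (List Char)),
    l.length ≤ fuel →
    PySem.Chars.splitOn.go ['/'] fuel l cur acc
      = acc.reverse ++ (List.splitOnP (· == '/') l).modifyHead (cur.reverse ++ ·) := by
  induction fuel with
  | zero =>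
    intro l cur acc h
    have : l = [] := List.length_eq_zero_iff.mp (Nat.le_zero.mp h)
    subst this
    simp [PySem.Chars.splitOn.go, List.splitOnP_nil]
  | succ n ih =>
    intro l cur acc h
    cases l with
    | nil => simp [PySem.Chars.splitOn.go, List.splitOnP_nil]
    | cons c rest =>
      simp only [PySem.Chars.splitOn.go]
      simp only [List.length_cons] at h
      by_cases hc : c = '/'
      · subst hc
        have hpre : List.isPrefixOf ['/'] ('/' :: rest) = true := by simp [List.isPrefixOf]
        rw [if_pos hpre]
        simp only [List.length_singleton, List.drop_succ_cons, List.drop_zero]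
        rw [ih rest [] (cur.reverse :: acc) (by omega)]
        simp [List.splitOnP_cons]
        exact congrFun List.modifyHead_id _
      · have hpre : List.isPrefixOf ['/'] (c :: rest) = false := by
          simp [List.isPrefixOf]; exact fun hh => absurd hh.symm hc
        rw [if_neg (by simp [hpre])]
        rw [ih rest (c :: cur) acc (by omega)]
        rw [List.splitOnP_cons]
        rw [if_neg (by simp [hc])]
        rw [List.modifyHead_modifyHead]
        congr 1
        obtain ⟨hh, t, he⟩ := List.exists_cons_of_ne_nil (List.splitOnP_ne_nil (· == '/') rest)
        rw [he]
        simp [List.modifyHead]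

theorem chars_splitOn_eq (s : List Char) :
    PySem.Chars.splitOn s ['/'] = List.splitOn '/' s := by
  unfold PySem.Chars.splitOn List.splitOn
  rw [splitOn_go_eq (s.length + 1) s [] [] (by omega)]
  obtain ⟨hh, t, he⟩ := List.exists_cons_of_ne_nil (List.splitOnP_ne_nil (· == '/') s)
  rw [he]; simp [List.modifyHead]

theorem not_mem_splitOnP (s : List Char) :
    ∀ p ∈ List.splitOnP (· == '/') s, '/' ∉ p := by
  induction s with
  | nil => simp [List.splitOnP_nil]
  | cons c rest ih =>
    rw [List.splitOnP_cons]
    by_cases hc : c = '/'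
    · subst hc; simp; exact ih
    · rw [if_neg (by simp [hc])]
      obtain ⟨hh, t, he⟩ := List.exists_cons_of_ne_nil (List.splitOnP_ne_nil (· == '/') rest)
      rw [he]
      intro p hp
      simp [List.modifyHead] at hp
      rcases hp with h1 | h2
      · subst h1
        intro hm
        rcases List.mem_cons.mp hm with h | h
        · exact hc h.symm
        · exact ih hh (by rw [he]; exact List.mem_cons_self) h
      · exact ih p (by rw [he]; exact List.mem_cons_of_mem _ h2)

-- split/join roundtrip at the String level, for '/'-free pieces
theorem split_join (ps : List String) (hne : ps ≠ [])
    (hfree : ∀ p ∈ ps, '/' ∉ p.toList) :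
    PySem.Str.split? (PySem.Str.join "/" ps) "/" = some ps := by
  unfold PySem.Str.split?
  rw [PySem.Str.toList_join]
  have hsep : ("/" : String).toList = ['/'] := by decide
  rw [hsep]
  have h1 : PySem.Chars.split? (PySem.Chars.join ['/'] (ps.map String.toList)) ['/']
      = some (List.splitOn '/' (PySem.Chars.join ['/'] (ps.map String.toList))) := by
    simp [PySem.Chars.split?, chars_splitOn_eq]
  rw [h1]
  have h2 : List.splitOn '/' (PySem.Chars.join ['/'] (ps.map String.toList)) = ps.map String.toList := by
    have : PySem.Chars.join ['/'] (ps.map String.toList) = ['/'].intercalate (ps.map String.toList) := rfl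
    rw [this]
    exact List.splitOn_intercalate _ _ (by intro l hl; obtain ⟨p, hp, rfl⟩ := List.mem_map.mp hl; exact hfree p hp) (by simpa using hne)
  rw [h2]
  simp only [Option.map_some, List.map_map]
  congr 1
  exact List.map_congr_left (fun p _ => String.ofList_toList) |>.trans (List.map_id _)

-- the common shape both programs compute, driven by the suffix structure
def pvF (standard : String) (mapping : List (String × List String)) : List String → List String
  | [] => []
  | p :: rest =>
    (if PySem.Str.join "/" (p :: rest) ≠ "" then
      (mapping.filter (fun q => q.2.contains (PySem.Str.join "/" (p :: rest)))).map
        (fun q => "/" ++ standard ++ "/overview/" ++ q.1)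
     else []) ++ pvF standard mapping (p :: rest).dropLast
termination_by ps => ps.length
decreasing_by simp only [List.length_dropLast, List.length_cons]; omega

-- length of the join shrinks strictly when a last piece is dropped from ≥ 2 pieces
theorem join_cons_cons_str (p q : String) (rest : List String) :
    PySem.Str.join "/" (p :: q :: rest)
      = p ++ "/" ++ PySem.Str.join "/" (q :: rest) := by
  apply String.toList_inj.mp
  simp only [PySem.Str.toList_join, String.toList_append, List.map_cons]
  rw [PySem.Chars.join_cons_cons]

theorem join_singleton_str (p : String) : PySem.Str.join "/" [p] = p := by
  apply String.toList_inj.mp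
  simp [PySem.Str.toList_join, PySem.Chars.join_singleton]

theorem join_dropLast_lt (q : String) (rest : List String) (h : rest ≠ []) :
    (PySem.Str.join "/" (q :: rest).dropLast).length < (PySem.Str.join "/" (q :: rest)).length := by
  induction rest generalizing q with
  | nil => exact absurd rfl h
  | cons r rs ih =>
    cases rs with
    | nil =>
      simp [join_cons_cons_str, join_singleton_str, String.length_append]
      have h1 : "/".length = 1 := rfl
      omega
    | cons r2 rs2 =>
      have key := ih r (by simp)
      have hd : (q :: r :: r2 :: rs2).dropLast = q :: r :: (r2 :: rs2).dropLast := rfl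
      have hd2 : (r :: r2 :: rs2).dropLast = r :: (r2 :: rs2).dropLast := rfl
      rw [hd, join_cons_cons_str q r ((r2 :: rs2).dropLast), join_cons_cons_str q r (r2 :: rs2)]
      rw [hd2] at key
      simp only [String.length_append]
      omega

theorem go_empty (standard : String) (mapping : List (String × List String)) (fuel : Nat) :
    lookup_see_also_go standard mapping fuel "" = [] := by
  cases fuel <;> simp [lookup_see_also_go]

theorem A_go_eq_pvF (standard : String) (mapping : List (String × List String)) :
    ∀ (fuel : Nat) (ps : List String), ps ≠ [] →
      (∀ p ∈ ps, '/' ∉ p.toList) →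
      (PySem.Str.join "/" ps).length < fuel →
      lookup_see_also_go standard mapping fuel (PySem.Str.join "/" ps)
        = pvF standard mapping ps := by
  intro fuel
  induction fuel with
  | zero => intro ps _ _ hlen; omega
  | succ n ih =>
    intro ps hne hfree hlen
    obtain ⟨p, rest, rfl⟩ := List.exists_cons_of_ne_nil hne
    simp only [lookup_see_also_go]
    by_cases hjoin : PySem.Str.join "/" (p :: rest) = ""
    · rw [if_pos hjoin, pvF]
      rw [if_neg (by simp [hjoin])]
      cases rest with
      | nil => simp [pvF]
      | cons r rs =>
        exfalso
        have h1 := join_dropLast_lt p (r :: rs) (by simp)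
        rw [hjoin] at h1
        simp at h1
    · rw [if_neg hjoin, pvF, if_pos hjoin]
      congr 1
      · rw [PySem.List.foldl_append_if]
        simp
      · have htr : pvTruncPath (PySem.Str.join "/" (p :: rest))
            = PySem.Str.join "/" (p :: rest).dropLast := by
          unfold pvTruncPath
          rw [split_join (p :: rest) (by simp) hfree]
          simp [PySem.List.slice_to_neg_one]
        rw [htr]
        cases rest with
        | nil =>
          have : PySem.Str.join "/" ([p] : List String).dropLast = "" := rfl
          rw [this, go_empty]
          simp [pvF]
        | cons r rs =>
          exact ih ((p :: r :: rs).dropLast) (by simp)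
            (fun q hq => hfree q (List.mem_of_mem_dropLast hq))
            (by have := join_dropLast_lt p (r :: rs) (by simp); omega)

theorem B_flatMap_eq_pvF (standard : String) (mapping : List (String × List String)) :
    ∀ (ps : List String),
      ((PySem.List.pyRange (ps.length : Int) 0 (-1)).map
        (fun i => PySem.Str.join "/" (PySem.List.slice ps none (some i)))).flatMap (fun p =>
          if p ≠ "" then
            (mapping.filter (fun q => q.2.contains p)).map
              (fun q => "/" ++ standard ++ "/overview/" ++ q.1)
          else [])
        = pvF standard mapping ps := by
  intro ps
  induction hn : ps.length generalizing ps with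
  | zero =>
    have : ps = [] := List.length_eq_zero_iff.mp hn
    subst this
    rw [PySem.List.pyRange_neg_one_eq_nil (by omega)]
    simp [pvF]
  | succ n ih =>
    have hne : ps ≠ [] := by intro h; subst h; simp at hn
    rw [PySem.List.pyRange_neg_one_cons (by push_cast; omega)]
    have hcast : ((n + 1 : Nat) : Int) - 1 = (n : Int) := by push_cast; omega
    rw [List.map_cons, List.flatMap_cons, hcast]
    have hhead : PySem.List.slice ps none (some ((n + 1 : Nat) : Int)) = ps := by
      rw [PySem.List.slice_to_natCast]
      exact List.take_of_length_le (by omega)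
    have htail : (PySem.List.pyRange (n : Int) 0 (-1)).map
        (fun i => PySem.Str.join "/" (PySem.List.slice ps none (some i)))
        = (PySem.List.pyRange (n : Int) 0 (-1)).map
        (fun i => PySem.Str.join "/" (PySem.List.slice ps.dropLast none (some i))) := by
      apply List.map_congr_left
      intro i hi
      have hi' := (PySem.List.mem_pyRange_neg_one).mp hi
      congr 1
      rw [PySem.List.slice_to ps (le_of_lt hi'.1), PySem.List.slice_to ps.dropLast (le_of_lt hi'.1)]
      rw [List.dropLast_eq_take, hn, List.take_take]
      congr 1
      omega
    rw [hhead, htail, ih ps.dropLast (by rw [List.length_dropLast]; omega)]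
    obtain ⟨p, rest, rfl⟩ := List.exists_cons_of_ne_nil hne
    rw [pvF]

-- ===== VERDICT (by name: the statement is the Claim_ definition above) =====
theorem lookup_see_also_spec : Claim_equal_lookup_see_also := by
  intro standard mapping path _
  unfold Spec_lookup_see_also
  have hsplit : PySem.Str.split? path "/"
      = some ((List.splitOn '/' path.toList).map String.ofList) := by
    unfold PySem.Str.split?
    rw [show ("/" : String).toList = ['/'] from rfl]
    simp [PySem.Chars.split?, chars_splitOn_eq]
  have hfree : ∀ p ∈ (List.splitOn '/' path.toList).map String.ofList, '/' ∉ p.toList := by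
    intro p hp
    obtain ⟨l, hl, rfl⟩ := List.mem_map.mp hp
    rw [String.toList_ofList]
    exact not_mem_splitOnP path.toList l (by simpa [List.splitOn] using hl)
  have hne : (List.splitOn '/' path.toList).map String.ofList ≠ [] := by
    simp [List.splitOn]
    exact List.splitOnP_ne_nil _ _
  have hjoin : PySem.Str.join "/" ((List.splitOn '/' path.toList).map String.ofList) = path := by
    apply String.toList_inj.mp
    rw [PySem.Str.toList_join]
    have h1 : ((List.splitOn '/' path.toList).map String.ofList).map String.toList
        = List.splitOn '/' path.toList := by
      rw [List.map_map]
      exact (List.map_congr_left (fun l _ => String.toList_ofList)).trans (List.map_id _)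
    rw [h1]
    exact List.intercalate_splitOn path.toList '/'
  unfold lookup_see_also
  conv_lhs => rw [← hjoin]
  rw [A_go_eq_pvF standard mapping _ _ hne hfree (by rw [hjoin]; omega)]
  unfold lookup_see_also_alt
  rw [hsplit]
  simp only [Option.getD_some]
  rw [B_flatMap_eq_pvF]
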